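-- pv_equiv track=rewrite | github.com/Rajveer2009/flyCode | flyCode.py | modify_binary_string
-- ===== SOURCE A (Python) =====
-- def modify_binary_string(input_string, character_to_flip_index):
--   """Modifies the string as specified in the prompt, including flipping a specific character."""
--   modified_string = ""
--   current_group = ""
--   for character in input_string:
--     current_group += character
--     if len(current_group) == 7:
--       # Flip the specified character
--       current_group = (
--           current_group[:int(character_to_flip_index)]
--           + ("0" if current_group[int(character_to_flip_index)] == "1" else "1")
--           + current_group[int(character_to_flip_index) + 1 :]
--       )
--       # Add space and modified group
--       modified_string += "0" + current_group + " "
--       current_group = ""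
--   # Add remaining characters (may be less than 7)
--   if current_group:
--     current_group = (
--         current_group[:int(character_to_flip_index)]
--         + ("0" if current_group[int(character_to_flip_index)] == "1" else "1")
--         + current_group[int(character_to_flip_index) + 1 :]
--     )  # Flip if needed
--     modified_string += "0" + current_group  # Add leading zero if needed
--   return modified_string
-- ===== SOURCE B (Python) =====
-- def _flip(group, index):
--     i = int(index)
--     return group[:i] + ("0" if group[i] == "1" else "1") + group[i + 1:]
--
--
-- def modify_binary_string(input_string, character_to_flip_index):
--     """Modifies the string as specified in the prompt, including flipping a specific character."""
--     parts = []
--     for i in range(0, len(input_string), 7):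
--         chunk = input_string[i:i + 7]
--         flipped = "0" + _flip(chunk, character_to_flip_index)
--         parts.append(flipped + " " if len(chunk) == 7 else flipped)
--     return "".join(parts)
-- ===== Notes on version B (the rewrite author's own statement) =====
-- stated objective: simpler
-- what changed: Replaces A's character-by-character accumulator loop with dangling-group state by a loop over chunk start indices range(0, len, 7) that slices each 7-char chunk directly, appends '0'+flip(chunk)(+' ' for full chunks) to a parts list and joins once.
import Mathlib
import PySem

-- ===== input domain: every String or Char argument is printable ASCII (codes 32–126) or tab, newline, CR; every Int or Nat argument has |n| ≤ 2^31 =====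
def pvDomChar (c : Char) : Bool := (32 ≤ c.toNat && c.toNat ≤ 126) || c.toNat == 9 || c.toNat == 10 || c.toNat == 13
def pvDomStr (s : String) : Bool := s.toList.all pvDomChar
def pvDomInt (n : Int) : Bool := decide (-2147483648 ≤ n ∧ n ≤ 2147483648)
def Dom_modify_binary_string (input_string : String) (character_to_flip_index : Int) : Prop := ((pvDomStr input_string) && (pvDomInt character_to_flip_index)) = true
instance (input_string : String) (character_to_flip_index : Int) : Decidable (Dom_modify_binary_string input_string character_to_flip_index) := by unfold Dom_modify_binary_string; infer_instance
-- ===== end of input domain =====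

-- B replaces A's char-by-char accumulator loop with a slice-per-chunk loop over the
-- chunk start indices and a single join (objective: simpler decomposition, same cost).

-- ===== PORT A =====
-- g[:idx] + ("0" if g[idx] == "1" else "1") + g[idx+1:]   (A writes this inline, twice)
def pvFlipA (g : List Char) (i : Int) : List Char :=
  PySem.List.slice g none (some i)
    ++ (if PySem.List.pyGet? g i = some '1' then '0' else '1')
    :: PySem.List.slice g (some (i + 1)) none

-- the 'for character in input_string' loop; state = (modified_string, current_group)
def pvLoopA (i : Int) : List Char → List Char × List Char → List Char × List Char
  | [], st => st
  | c :: rest, (m, g) =>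
    let g' := g ++ [c]
    if g'.length = 7 then
      pvLoopA i rest (m ++ '0' :: pvFlipA g' i ++ [' '], [])
    else
      pvLoopA i rest (m, g')

def modify_binary_string (input_string : String) (character_to_flip_index : Int) : String :=
  let st := pvLoopA character_to_flip_index input_string.toList ([], [])
  if st.2 = [] then String.mk st.1
  else String.mk (st.1 ++ '0' :: pvFlipA st.2 character_to_flip_index)

-- ===== PORT B =====
-- B's _flip helper (same slice formula as A's inline flips)
def pvFlipB (g : List Char) (i : Int) : List Char :=
  PySem.List.slice g none (some i)
    ++ (if PySem.List.pyGet? g i = some '1' then '0' else '1')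
    :: PySem.List.slice g (some (i + 1)) none

-- body of B's 'for i in range(0, len(input_string), 7)' loop (parts kept flattened)
def pvStepB (l : List Char) (i : Int) (acc : List Char) (j : Int) : List Char :=
  let chunk := PySem.List.slice l (some j) (some (j + 7))
  let flipped := '0' :: pvFlipB chunk i
  acc ++ (if chunk.length = 7 then flipped ++ [' '] else flipped)

def modify_binary_string_alt (input_string : String) (character_to_flip_index : Int) : String :=
  let l := input_string.toList
  String.mk ((PySem.List.pyRange 0 l.length 7).foldl (pvStepB l character_to_flip_index) [])

-- ===== PRECONDITION & SPEC =====
-- Pre_ excludes exactly the inputs on which Python A raises IndexError: the flip index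
-- must be a valid Python index into every chunk present (length-7 chunks, and the
-- remainder chunk of length len % 7 when it is non-empty).
def Pre_modify_binary_string (input_string : String) (character_to_flip_index : Int) : Prop :=
  (7 ≤ input_string.toList.length →
    -7 ≤ character_to_flip_index ∧ character_to_flip_index < 7) ∧
  (0 < input_string.toList.length % 7 →
    -((input_string.toList.length % 7 : Nat) : Int) ≤ character_to_flip_index ∧
      character_to_flip_index < ((input_string.toList.length % 7 : Nat) : Int))
instance (input_string : String) (character_to_flip_index : Int) : Decidable (Pre_modify_binary_string input_string character_to_flip_index) := by unfold Pre_modify_binary_string; infer_instance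

def pvWitness_modify_binary_string : String × Int := ("0110100", 3)

def Spec_modify_binary_string (input_string : String) (character_to_flip_index : Int) (out : String) : Prop := out = modify_binary_string_alt input_string character_to_flip_index
instance (input_string : String) (character_to_flip_index : Int) (out : String) : Decidable (Spec_modify_binary_string input_string character_to_flip_index out) := by unfold Spec_modify_binary_string; infer_instance

-- ===== CLAIM (what is proved, stated in full; the proofs are below) =====
def Claim_equal_modify_binary_string : Prop := ∀ (input_string : String) (character_to_flip_index : Int), Dom_modify_binary_string input_string character_to_flip_index → Pre_modify_binary_string input_string character_to_flip_index → Spec_modify_binary_string input_string character_to_flip_index (modify_binary_string input_string character_to_flip_index)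

-- ===== LEMMAS AND PROOFS =====

theorem pvFlipB_eq_flipA (g : List Char) (i : Int) : pvFlipB g i = pvFlipA g i := rfl

-- common chunk-wise recursion both ports are reduced to
def pvChunkRec (i : Int) : List Char → List Char
  | [] => []
  | c :: rest =>
    (if ((c :: rest).take 7).length = 7
      then '0' :: pvFlipA ((c :: rest).take 7) i ++ [' ']
      else '0' :: pvFlipA ((c :: rest).take 7) i)
      ++ pvChunkRec i ((c :: rest).drop 7)
termination_by l => l.length
decreasing_by simp

theorem pvChunkRec_nil (i : Int) : pvChunkRec i [] = [] := by simp [pvChunkRec.eq_def]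

theorem pvChunkRec_cons (i : Int) (c : Char) (rest : List Char) :
    pvChunkRec i (c :: rest) =
      (if ((c :: rest).take 7).length = 7
        then '0' :: pvFlipA ((c :: rest).take 7) i ++ [' ']
        else '0' :: pvFlipA ((c :: rest).take 7) i)
        ++ pvChunkRec i ((c :: rest).drop 7) := by rw [pvChunkRec.eq_def]

theorem pvLoopA_small (i : Int) : ∀ (l : List Char) (m g : List Char),
    g.length + l.length < 7 → pvLoopA i l (m, g) = (m, g ++ l) := by
  intro l
  induction l with
  | nil => intro m g _; simp [pvLoopA]
  | cons c rest ih =>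
    intro m g h
    simp only [pvLoopA]
    have hlen : (g ++ [c]).length ≠ 7 := by simp at h ⊢; omega
    rw [if_neg hlen, ih]
    · simp
    · simp at h ⊢; omega

theorem pvLoopA_fill (i : Int) : ∀ (l : List Char) (m g : List Char),
    g.length < 7 → 7 ≤ g.length + l.length →
    pvLoopA i l (m, g) =
      pvLoopA i (l.drop (7 - g.length))
        (m ++ '0' :: pvFlipA (g ++ l.take (7 - g.length)) i ++ [' '], []) := by
  intro l
  induction l with
  | nil => intro m g h1 h2; simp at h2; omega
  | cons c rest ih =>
    intro m g h1 h2
    simp only [pvLoopA]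
    by_cases h6 : g.length = 6
    · have hlen : (g ++ [c]).length = 7 := by simp [h6]
      rw [if_pos hlen]
      have h71 : 7 - g.length = 1 := by omega
      simp [h71]
    · have hlen : (g ++ [c]).length ≠ 7 := by simp; omega
      rw [if_neg hlen]
      rw [ih (m) (g ++ [c]) (by simp; omega) (by simp at h2 ⊢; omega)]
      obtain ⟨k, hk⟩ : ∃ k, 7 - g.length = k + 1 := ⟨6 - g.length, by omega⟩
      have hk' : 7 - (g ++ [c]).length = k := by simp; omega
      rw [hk, hk']
      simp

theorem pvLoopA_chunks (i : Int) : ∀ (n : Nat) (l m : List Char), l.length ≤ n →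
    (let st := pvLoopA i l (m, [])
     if st.2 = [] then st.1 else st.1 ++ '0' :: pvFlipA st.2 i) = m ++ pvChunkRec i l := by
  intro n
  induction n with
  | zero =>
    intro l m h
    have : l = [] := by cases l <;> simp_all
    subst this; simp [pvLoopA, pvChunkRec_nil]
  | succ n ih =>
    intro l m h
    match l with
    | [] => simp [pvLoopA, pvChunkRec_nil]
    | c :: rest =>
      by_cases hb : (c :: rest).length < 7
      · rw [pvLoopA_small i _ m [] (by simpa using hb)]
        have ht : (c :: rest).take 7 = c :: rest := List.take_of_length_le (by omega)
        have hd : (c :: rest).drop 7 = [] := List.drop_eq_nil_of_le (by omega)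
        have hb2 : rest.length < 6 := by simp at hb; omega
        have hcond : ¬ ((c :: rest).take 7).length = 7 := by simp [ht]; omega
        rw [pvChunkRec_cons, if_neg hcond, ht, hd, pvChunkRec_nil]
        simp
      · push_neg at hb
        rw [pvLoopA_fill i _ m [] (by simp) (by simpa using hb)]
        simp only [List.length_nil, Nat.sub_zero, List.nil_append]
        rw [ih _ _ (by simp at h ⊢; omega)]
        rw [pvChunkRec_cons, if_pos (by rw [List.length_take]; omega)]
        simp

theorem pyRange7_cons (a b : Int) (h : a < b) :
    PySem.List.pyRange a b 7 = a :: PySem.List.pyRange (a + 7) b 7 := by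
  rw [PySem.List.pyRange_of_pos _ _ (by norm_num), PySem.List.pyRange_of_pos _ _ (by norm_num)]
  rw [if_pos h]
  by_cases h2 : a + 7 < b
  · rw [if_pos h2]
    have hcount : ((b - a + 7 - 1) / 7).toNat = ((b - (a + 7) + 7 - 1) / 7).toNat + 1 := by
      have h1 : (b - a + 7 - 1) / 7 = (b - (a + 7) + 7 - 1) / 7 + 1 := by omega
      have hnn : 0 ≤ (b - (a + 7) + 7 - 1) / 7 := Int.ediv_nonneg (by omega) (by norm_num)
      omega
    rw [hcount, List.range_succ_eq_map]
    simp only [List.map_cons, List.map_map]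
    congr 1
    · push_cast; ring
    · apply List.map_congr_left
      intro k _
      simp only [Function.comp]; push_cast; ring
  · rw [if_neg h2]
    have hcount : ((b - a + 7 - 1) / 7).toNat = 1 := by
      have h1 : (b - a + 7 - 1) / 7 = 1 := by omega
      rw [h1]; rfl
    rw [hcount]
    simp

theorem pvFoldB_chunks (l : List Char) (i : Int) : ∀ (N : Nat) (a : Nat) (acc : List Char),
    l.length - a ≤ N →
    (PySem.List.pyRange (a : Int) l.length 7).foldl (pvStepB l i) acc =
      acc ++ pvChunkRec i (l.drop a) := by
  intro N
  induction N with
  | zero =>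
    intro a acc h
    have hge : l.length ≤ a := by omega
    rw [PySem.List.pyRange_of_pos _ _ (by norm_num), if_neg (by exact_mod_cast not_lt.mpr hge)]
    rw [List.drop_eq_nil_of_le hge, pvChunkRec_nil]
    simp
  | succ N ih =>
    intro a acc h
    by_cases hlt : a < l.length
    · rw [pyRange7_cons _ _ (by exact_mod_cast hlt)]
      simp only [List.foldl_cons]
      have hcast : ((a : Int) + 7) = ((a + 7 : Nat) : Int) := by push_cast; ring
      rw [hcast, ih (a + 7) _ (by omega)]
      have hchunk : PySem.List.slice l (some (a : Int)) (some ((a : Int) + 7)) =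
          (l.drop a).take 7 := by
        have := PySem.List.slice_natCast_add l a 7
        exact_mod_cast this
      obtain ⟨c, rest, hcr⟩ : ∃ c rest, l.drop a = c :: rest := by
        rcases hdrop : l.drop a with _ | ⟨c, rest⟩
        · exfalso; have := List.drop_eq_nil_iff.mp hdrop; omega
        · exact ⟨c, rest, rfl⟩
      have hdd : l.drop (a + 7) = (l.drop a).drop 7 := by
        rw [List.drop_drop]
      rw [hdd, hcr, pvChunkRec_cons]
      simp only [pvStepB, hchunk, hcr, pvFlipB_eq_flipA]
      split_ifs <;> simp
    · rw [PySem.List.pyRange_of_pos _ _ (by norm_num),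
        if_neg (by exact_mod_cast hlt)]
      rw [List.drop_eq_nil_of_le (by omega), pvChunkRec_nil]
      simp

-- ===== VERDICT (by name: the statement is the Claim_ definition above) =====
theorem modify_binary_string_spec : Claim_equal_modify_binary_string := by
  intro s i _ _
  unfold Spec_modify_binary_string modify_binary_string modify_binary_string_alt
  have hA := pvLoopA_chunks i s.toList.length s.toList [] (le_refl _)
  simp only [List.nil_append] at hA
  have hB := pvFoldB_chunks s.toList i s.toList.length 0 [] (by omega)
  simp only [Nat.cast_zero, List.drop_zero, List.nil_append] at hB
  simp only []
  rw [hB]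
  split_ifs at hA ⊢ with hg
  · rw [hA]
  · rw [hA]
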